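-- pv_equiv track=rewrite | github.com/jonathonreilly/toy-physics | scripts/frontier_directed_cell_boundary_cluster.py | vertices_cell
-- ===== SOURCE A (Python) =====
-- from itertools import combinations, product
--
-- Cell = tuple[tuple[int, int, int, int], tuple[int, int, int]]
--
-- def vertices_cell(cell: Cell) -> set[tuple[int, int, int, int]]:
--     anchor, axes = cell
--     vertices: set[tuple[int, int, int, int]] = set()
--     for bits in product((0, 1), repeat=3):
--         point = list(anchor)
--         for bit, axis in zip(bits, axes):
--             point[axis] += bit
--         vertices.add(tuple(point))
--     return vertices
-- ===== SOURCE B (Python) =====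
-- def _shift(v, axis):
--     w = list(v)
--     w[axis] += 1
--     return tuple(w)
--
-- def vertices_cell(cell):
--     anchor, axes = cell
--     vertices = {tuple(anchor)}
--     # build the vertex set incrementally: one set-doubling pass per axis, last axis first
--     for axis in reversed(axes):
--         vertices |= {_shift(v, axis) for v in vertices}
--     return vertices
-- ===== Notes on version B (the rewrite author's own statement) =====
-- stated objective: alternative
-- what changed: B builds the vertex set incrementally, starting from the anchor alone and doubling the set once per axis (unioning in a +1-shifted copy along that axis), instead of enumerating all 2^3 bit patterns and re-applying every bit to a fresh copy of the anchor.
import Mathlib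
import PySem

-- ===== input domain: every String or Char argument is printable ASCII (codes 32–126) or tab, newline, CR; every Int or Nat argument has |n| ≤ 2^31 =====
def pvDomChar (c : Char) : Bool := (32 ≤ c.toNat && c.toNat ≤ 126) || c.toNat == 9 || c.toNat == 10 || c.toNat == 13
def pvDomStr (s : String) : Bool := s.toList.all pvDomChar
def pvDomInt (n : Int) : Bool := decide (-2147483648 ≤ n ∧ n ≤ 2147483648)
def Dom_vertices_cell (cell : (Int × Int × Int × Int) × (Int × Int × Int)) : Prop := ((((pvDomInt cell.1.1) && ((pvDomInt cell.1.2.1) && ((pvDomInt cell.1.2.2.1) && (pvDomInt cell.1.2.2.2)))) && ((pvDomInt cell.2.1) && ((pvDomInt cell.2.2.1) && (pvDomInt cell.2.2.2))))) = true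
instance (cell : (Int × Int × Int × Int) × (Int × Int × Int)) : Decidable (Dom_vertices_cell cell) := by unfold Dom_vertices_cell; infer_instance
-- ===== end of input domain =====

-- B builds the vertex set incrementally (one set-doubling pass per axis, last axis first)
-- instead of enumerating all 2^3 bit patterns; same cost, different decomposition.

-- ===== PORT A =====
-- product((0, 1), repeat=3), in Python's order
def pvBits : List (Int × Int × Int) :=
  [(0 : Int), 1].flatMap (fun b0 => [(0 : Int), 1].flatMap (fun b1 => [(0 : Int), 1].map (fun b2 => (b0, b1, b2))))

-- point[axis] += bit on the point list (exact Python indexing for axis ∈ [-4,3], which Pre_ guarantees)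
def pvApplyBit (p : List Int) (bit axis : Int) : List Int :=
  PySem.List.pySetD p axis (PySem.List.pyGetD p axis 0 + bit)

-- tuple(point) for the always-4-element point list
def pvTup4 (p : List Int) : Int × Int × Int × Int :=
  match p with
  | [a, b, c, d] => (a, b, c, d)
  | _ => (0, 0, 0, 0)

def vertices_cell (cell : (Int × Int × Int × Int) × (Int × Int × Int)) : List (Int × Int × Int × Int) :=
  let anchor := cell.1
  let axes := cell.2
  pvBits.foldl (fun vertices bits =>
    let p0 : List Int := [anchor.1, anchor.2.1, anchor.2.2.1, anchor.2.2.2]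
    let p1 := pvApplyBit p0 bits.1 axes.1
    let p2 := pvApplyBit p1 bits.2.1 axes.2.1
    let p3 := pvApplyBit p2 bits.2.2 axes.2.2
    PySem.Set.add vertices (pvTup4 p3)) PySem.Set.empty

-- ===== PORT B =====
-- _shift: w = list(v); w[axis] += 1; tuple(w) (exact Python indexing for axis ∈ [-4,3], which Pre_ guarantees)
def pvShift (v : Int × Int × Int × Int) (axis : Int) : Int × Int × Int × Int :=
  let w : List Int := [v.1, v.2.1, v.2.2.1, v.2.2.2]
  match PySem.List.pySetD w axis (PySem.List.pyGetD w axis 0 + 1) with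
  | [a, b, c, d] => (a, b, c, d)
  | _ => (0, 0, 0, 0)

def vertices_cell_alt (cell : (Int × Int × Int × Int) × (Int × Int × Int)) : List (Int × Int × Int × Int) :=
  let anchor := cell.1
  let axes := cell.2
  [axes.2.2, axes.2.1, axes.1].foldl
    (fun vertices axis => PySem.Set.update vertices (vertices.map (fun v => pvShift v axis)))
    (PySem.Set.add PySem.Set.empty anchor)

-- ===== PRECONDITION & SPEC =====
-- Pre_ excludes exactly the inputs where the Pythons raise IndexError: an axis outside [-4,3]
-- is an invalid Python index into a 4-element list.
def Pre_vertices_cell (cell : (Int × Int × Int × Int) × (Int × Int × Int)) : Prop :=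
  (-4 ≤ cell.2.1 ∧ cell.2.1 < 4) ∧ (-4 ≤ cell.2.2.1 ∧ cell.2.2.1 < 4) ∧ (-4 ≤ cell.2.2.2 ∧ cell.2.2.2 < 4)
instance (cell : (Int × Int × Int × Int) × (Int × Int × Int)) : Decidable (Pre_vertices_cell cell) := by unfold Pre_vertices_cell; infer_instance
def pvWitness_vertices_cell : ((Int × Int × Int × Int) × (Int × Int × Int)) := ((0, 0, 0, 0), (0, 1, 2))

def Spec_vertices_cell (cell : (Int × Int × Int × Int) × (Int × Int × Int)) (out : List (Int × Int × Int × Int)) : Prop := out = vertices_cell_alt cell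
instance (cell : (Int × Int × Int × Int) × (Int × Int × Int)) (out : List (Int × Int × Int × Int)) : Decidable (Spec_vertices_cell cell out) := by unfold Spec_vertices_cell; infer_instance

-- ===== CLAIM (what is proved, stated in full; the proofs are below) =====
def Claim_equal_vertices_cell : Prop := ∀ (cell : (Int × Int × Int × Int) × (Int × Int × Int)), Dom_vertices_cell cell → Pre_vertices_cell cell → Spec_vertices_cell cell (vertices_cell cell)

-- ===== LEMMAS AND PROOFS =====

-- translation by the anchor
def pvT (a b c d : Int) (v : Int × Int × Int × Int) : Int × Int × Int × Int :=
  (a + v.1, b + v.2.1, c + v.2.2.1, d + v.2.2.2)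

-- add t at coordinate axis % 4 (tuple level)
def pvBmpT (axis t : Int) (v : Int × Int × Int × Int) : Int × Int × Int × Int :=
  if PySem.Int.mod axis 4 = 0 then (v.1 + t, v.2.1, v.2.2.1, v.2.2.2)
  else if PySem.Int.mod axis 4 = 1 then (v.1, v.2.1 + t, v.2.2.1, v.2.2.2)
  else if PySem.Int.mod axis 4 = 2 then (v.1, v.2.1, v.2.2.1 + t, v.2.2.2)
  else (v.1, v.2.1, v.2.2.1, v.2.2.2 + t)

def pvTl (v : Int × Int × Int × Int) : List Int := [v.1, v.2.1, v.2.2.1, v.2.2.2]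

-- B's loop in terms of pvBmpT
def pvAltC (anchor : Int × Int × Int × Int) (x y z : Int) : List (Int × Int × Int × Int) :=
  [z, y, x].foldl (fun vertices ax => PySem.Set.update vertices (vertices.map (pvBmpT ax 1)))
    (PySem.Set.add PySem.Set.empty anchor)

lemma pvT_inj (a b c d : Int) (u v : Int × Int × Int × Int) (h : pvT a b c d u = pvT a b c d v) : u = v := by
  obtain ⟨u1, u2, u3, u4⟩ := u; obtain ⟨v1, v2, v3, v4⟩ := v
  simp [pvT, Prod.ext_iff] at h ⊢; omega

lemma pvBmpT_pvT (axis t a b c d : Int) (v : Int × Int × Int × Int) :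
    pvBmpT axis t (pvT a b c d v) = pvT a b c d (pvBmpT axis t v) := by
  unfold pvBmpT pvT
  split_ifs <;> (simp [Prod.ext_iff]; omega)

lemma pvApplyBit_pvTl (v : Int × Int × Int × Int) (t i : Int) (h1 : -4 ≤ i) (h2 : i < 4) :
    pvApplyBit (pvTl v) t i = pvTl (pvBmpT i t v) := by
  obtain ⟨p, q, r, s⟩ := v
  interval_cases i <;>
    simp [pvApplyBit, pvBmpT, pvTl, PySem.List.pySetD, PySem.List.pySet?, PySem.List.pyGetD,
      PySem.List.pyGet?, PySem.List.pyIdx?, PySem.Int.mod]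

lemma pvTup4_pvTl (v : Int × Int × Int × Int) : pvTup4 (pvTl v) = v := rfl

lemma pvShift_eq (axis : Int) (h1 : -4 ≤ axis) (h2 : axis < 4) (v : Int × Int × Int × Int) :
    pvShift v axis = pvBmpT axis 1 v := by
  show pvTup4 (pvApplyBit (pvTl v) 1 axis) = _
  rw [pvApplyBit_pvTl v 1 axis h1 h2, pvTup4_pvTl]

lemma set_add_map (f : (Int × Int × Int × Int) → (Int × Int × Int × Int))
    (hf : ∀ u v, f u = f v → u = v) (s : List (Int × Int × Int × Int)) (x : Int × Int × Int × Int) :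
    PySem.Set.add (s.map f) (f x) = (PySem.Set.add s x).map f := by
  rw [PySem.Set.add_eq_ite, PySem.Set.add_eq_ite]
  by_cases h : x ∈ s
  · simp [h, List.mem_map.mpr ⟨x, h, rfl⟩]
  · have : f x ∉ s.map f := by
      intro hm; obtain ⟨y, hy, he⟩ := List.mem_map.mp hm; exact h (hf y x he ▸ hy)
    simp [h, this]

lemma set_update_map (f : (Int × Int × Int × Int) → (Int × Int × Int × Int))
    (hf : ∀ u v, f u = f v → u = v) (L : List (Int × Int × Int × Int)) :
    ∀ s : List (Int × Int × Int × Int),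
      PySem.Set.update (s.map f) (L.map f) = (PySem.Set.update s L).map f := by
  induction L with
  | nil => intro s; rfl
  | cons x xs ih =>
    intro s
    rw [List.map_cons, PySem.Set.update_cons, PySem.Set.update_cons, set_add_map f hf, ih]

lemma set_ofList_map (f : (Int × Int × Int × Int) → (Int × Int × Int × Int))
    (hf : ∀ u v, f u = f v → u = v) (L : List (Int × Int × Int × Int)) :
    PySem.Set.ofList (L.map f) = (PySem.Set.ofList L).map f := by
  have h := set_update_map f hf L []
  simpa [PySem.Set.update_nil_left] using h

-- A's loop as set(map F bits)
lemma vertices_cell_eq_ofList (a b c d x y z : Int)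
    (hx1 : -4 ≤ x) (hx2 : x < 4) (hy1 : -4 ≤ y) (hy2 : y < 4) (hz1 : -4 ≤ z) (hz2 : z < 4) :
    vertices_cell ((a, b, c, d), (x, y, z)) =
      PySem.Set.ofList (pvBits.map (fun bt => pvBmpT z bt.2.2 (pvBmpT y bt.2.1 (pvBmpT x bt.1 (a, b, c, d))))) := by
  have hF : ∀ bt : Int × Int × Int,
      pvTup4 (pvApplyBit (pvApplyBit (pvApplyBit [a, b, c, d] bt.1 x) bt.2.1 y) bt.2.2 z) =
        pvBmpT z bt.2.2 (pvBmpT y bt.2.1 (pvBmpT x bt.1 (a, b, c, d))) := by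
    intro bt
    rw [show [a, b, c, d] = pvTl (a, b, c, d) from rfl,
      pvApplyBit_pvTl _ _ _ hx1 hx2, pvApplyBit_pvTl _ _ _ hy1 hy2,
      pvApplyBit_pvTl _ _ _ hz1 hz2, pvTup4_pvTl]
  simp only [vertices_cell]
  rw [← PySem.Set.update_nil_left, PySem.Set.update_map_eq_foldl_add]
  simp only [hF]
  rfl

lemma vertices_cell_shift (a b c d x y z : Int)
    (hx1 : -4 ≤ x) (hx2 : x < 4) (hy1 : -4 ≤ y) (hy2 : y < 4) (hz1 : -4 ≤ z) (hz2 : z < 4) :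
    vertices_cell ((a, b, c, d), (x, y, z)) =
      (vertices_cell ((0, 0, 0, 0), (x, y, z))).map (pvT a b c d) := by
  rw [vertices_cell_eq_ofList a b c d x y z hx1 hx2 hy1 hy2 hz1 hz2,
    vertices_cell_eq_ofList 0 0 0 0 x y z hx1 hx2 hy1 hy2 hz1 hz2,
    ← set_ofList_map (pvT a b c d) (pvT_inj a b c d), List.map_map]
  congr 1
  apply List.map_congr_left
  intro bt _
  have h0 : (a, b, c, d) = pvT a b c d ((0 : Int), (0 : Int), (0 : Int), (0 : Int)) := by
    simp [pvT]
  rw [Function.comp_apply, h0, pvBmpT_pvT, pvBmpT_pvT, pvBmpT_pvT]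

lemma vertices_cell_alt_eq_pvAltC (a b c d x y z : Int)
    (hx1 : -4 ≤ x) (hx2 : x < 4) (hy1 : -4 ≤ y) (hy2 : y < 4) (hz1 : -4 ≤ z) (hz2 : z < 4) :
    vertices_cell_alt ((a, b, c, d), (x, y, z)) = pvAltC (a, b, c, d) x y z := by
  simp only [vertices_cell_alt, pvAltC, List.foldl_cons, List.foldl_nil,
    show (fun v => pvShift v x) = pvBmpT x 1 from funext (pvShift_eq x hx1 hx2),
    show (fun v => pvShift v y) = pvBmpT y 1 from funext (pvShift_eq y hy1 hy2),
    show (fun v => pvShift v z) = pvBmpT z 1 from funext (pvShift_eq z hz1 hz2)]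

lemma pvAltC_shift (a b c d x y z : Int) :
    pvAltC (a, b, c, d) x y z = (pvAltC (0, 0, 0, 0) x y z).map (pvT a b c d) := by
  have key : ∀ (L : List Int) (s : List (Int × Int × Int × Int)),
      L.foldl (fun vs ax => PySem.Set.update vs (vs.map (pvBmpT ax 1))) (s.map (pvT a b c d)) =
        (L.foldl (fun vs ax => PySem.Set.update vs (vs.map (pvBmpT ax 1))) s).map (pvT a b c d) := by
    intro L
    induction L with
    | nil => intro s; rfl
    | cons ax L ih =>
      intro s
      simp only [List.foldl_cons]
      rw [show (s.map (pvT a b c d)).map (pvBmpT ax 1) = (s.map (pvBmpT ax 1)).map (pvT a b c d) by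
          rw [List.map_map, List.map_map]
          apply List.map_congr_left
          intro v _
          simp only [Function.comp_apply, pvBmpT_pvT],
        set_update_map (pvT a b c d) (pvT_inj a b c d), ih]
  simp only [pvAltC]
  have h0 : PySem.Set.add PySem.Set.empty ((a : Int), b, c, d) =
      (PySem.Set.add PySem.Set.empty ((0 : Int), (0 : Int), (0 : Int), (0 : Int))).map (pvT a b c d) := by
    simp [PySem.Set.add, PySem.Set.empty, pvT]
  rw [h0, key]

lemma mod4_bounds (x : Int) : 0 ≤ PySem.Int.mod x 4 ∧ PySem.Int.mod x 4 < 4 := by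
  rw [PySem.Int.mod_eq_emod_of_pos (by norm_num)]
  exact ⟨Int.emod_nonneg x (by norm_num), Int.emod_lt_of_pos x (by norm_num)⟩

lemma mod4_mod4 (x : Int) : PySem.Int.mod (PySem.Int.mod x 4) 4 = PySem.Int.mod x 4 := by
  rw [PySem.Int.mod_eq_emod_of_pos (by norm_num), PySem.Int.mod_eq_emod_of_pos (by norm_num)]
  exact Int.emod_emod_of_dvd x (by norm_num)

lemma pvBmpT_mod (axis t : Int) (v : Int × Int × Int × Int) :
    pvBmpT (PySem.Int.mod axis 4) t v = pvBmpT axis t v := by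
  simp only [pvBmpT, mod4_mod4]

lemma pvAltC_mod (anchor : Int × Int × Int × Int) (x y z : Int) :
    pvAltC anchor x y z = pvAltC anchor (PySem.Int.mod x 4) (PySem.Int.mod y 4) (PySem.Int.mod z 4) := by
  simp only [pvAltC, List.foldl_cons, List.foldl_nil,
    show pvBmpT (PySem.Int.mod x 4) 1 = pvBmpT x 1 from funext (pvBmpT_mod x 1),
    show pvBmpT (PySem.Int.mod y 4) 1 = pvBmpT y 1 from funext (pvBmpT_mod y 1),
    show pvBmpT (PySem.Int.mod z 4) 1 = pvBmpT z 1 from funext (pvBmpT_mod z 1)]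

-- ===== VERDICT (by name: the statement is the Claim_ definition above) =====
set_option maxHeartbeats 1000000 in
theorem vertices_cell_spec : Claim_equal_vertices_cell := by
  intro cell _ hPre
  obtain ⟨⟨a, b, c, d⟩, x, y, z⟩ := cell
  obtain ⟨⟨hx1, hx2⟩, ⟨hy1, hy2⟩, hz1, hz2⟩ := hPre
  unfold Spec_vertices_cell
  rw [vertices_cell_shift a b c d x y z hx1 hx2 hy1 hy2 hz1 hz2,
    vertices_cell_alt_eq_pvAltC a b c d x y z hx1 hx2 hy1 hy2 hz1 hz2,
    pvAltC_shift a b c d x y z]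
  congr 1
  rw [vertices_cell_eq_ofList 0 0 0 0 x y z hx1 hx2 hy1 hy2 hz1 hz2, pvAltC_mod]
  have hx' : ∀ t v, pvBmpT x t v = pvBmpT (PySem.Int.mod x 4) t v := fun t v => (pvBmpT_mod x t v).symm
  have hy' : ∀ t v, pvBmpT y t v = pvBmpT (PySem.Int.mod y 4) t v := fun t v => (pvBmpT_mod y t v).symm
  have hz' : ∀ t v, pvBmpT z t v = pvBmpT (PySem.Int.mod z 4) t v := fun t v => (pvBmpT_mod z t v).symm
  simp only [hx', hy', hz']
  have hbx := mod4_bounds x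
  have hby := mod4_bounds y
  have hbz := mod4_bounds z
  generalize PySem.Int.mod x 4 = mx at hbx ⊢
  generalize PySem.Int.mod y 4 = my at hby ⊢
  generalize PySem.Int.mod z 4 = mz at hbz ⊢
  obtain ⟨hbx1, hbx2⟩ := hbx
  obtain ⟨hby1, hby2⟩ := hby
  obtain ⟨hbz1, hbz2⟩ := hbz
  interval_cases mx <;> interval_cases my <;> interval_cases mz <;> decide
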